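-- pv_equiv track=rewrite | github.com/ahmadelsallab/SentimentClassification_Keras | Amira_NN.py | corpus_to_indices
-- ===== SOURCE A (Python) =====
-- def corpus_to_indices(text):
--     #words_map = build_words_map(text)
--
--     #text_to_indices(text, words_map)
--
--     # The vocabulary map
--     words_map = {}
--
--     # Index of words
--     index = 0
--
--     # Initialize the output list
--     text_indices = []
--     maxlen = 0
--     # Loop line by line
--     for line in text:
--         # Split into words
--         line_words = line.split()
--
--         if len(line_words) > maxlen:
--             maxlen = len(line_words)
--         # Initialize the line_indices
--         line_indices = []
--         # Loop word by word
--         for word in line_words: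
--             # Store the word once in the wordMap
--             if not word in words_map:
--                 words_map[word] = index
--                 # Increment the index for the next word
--                 index += 1
--
--             # Add the index to the line_indices
--             line_indices.append(words_map[word])
--
--         # Add the line_indices to the output list
--         text_indices.append(line_indices)
--
--
--     return text_indices, len(words_map), maxlen
-- ===== SOURCE B (Python) =====
-- def corpus_to_indices(text):
--     # Three separate passes: tokenize once, then maxlen, then vocabulary, then encode.
--     toks = [line.split() for line in text]
--     maxlen = max((len(t) for t in toks), default=0)
--     words_map = {}
--     for t in toks:
--         for w in t:
--             if w not in words_map:
--                 words_map[w] = len(words_map)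
--     text_indices = [[words_map[w] for w in t] for t in toks]
--     return text_indices, len(words_map), maxlen
-- ===== Notes on version B (the rewrite author's own statement) =====
-- stated objective: alternative
-- what changed: A fuses tokenization, maxlen tracking, vocabulary growth and encoding into one nested loop with a running index counter; B decomposes it into separate passes: tokenize all lines first, take the maximum length, build the first-occurrence vocabulary table (indexed by current dict size) in its own pass, then encode every line against the finished table.
import Mathlib
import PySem

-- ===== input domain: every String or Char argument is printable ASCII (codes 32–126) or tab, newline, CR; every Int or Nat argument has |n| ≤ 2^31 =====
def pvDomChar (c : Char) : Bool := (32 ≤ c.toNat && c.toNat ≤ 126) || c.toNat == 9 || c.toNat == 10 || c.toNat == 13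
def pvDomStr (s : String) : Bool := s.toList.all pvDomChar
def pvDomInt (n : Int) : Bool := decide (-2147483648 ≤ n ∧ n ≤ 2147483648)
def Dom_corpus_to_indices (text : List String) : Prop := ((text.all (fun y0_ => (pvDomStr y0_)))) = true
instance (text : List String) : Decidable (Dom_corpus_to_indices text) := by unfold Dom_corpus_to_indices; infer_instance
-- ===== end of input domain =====

-- B restates A as separate passes (tokenize, maxlen, vocabulary, encode) instead of A's
-- single fused nested loop with a running index counter; same cost (objective: alternative decomposition).

-- ===== PORT A =====
-- literal transliteration of A's fused loop; inner state = (words_map, index, line_indices)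
def pvAInner (s : PySem.Dict String Int × Int × List Int) (w : String) :
    PySem.Dict String Int × Int × List Int :=
  let s' := if s.1.contains w then (s.1, s.2.1) else (s.1.insert w s.2.1, s.2.1 + 1)
  -- words_map[w] afterwards: the key is now present, so getD is exact (no KeyError possible)
  (s'.1, s'.2, s.2.2 ++ [s'.1.getD w 0])

-- outer state = (words_map, index, text_indices, maxlen)
def pvAOuter (st : PySem.Dict String Int × Int × List (List Int) × Int) (line : String) :
    PySem.Dict String Int × Int × List (List Int) × Int :=
  let lw := PySem.Str.split₀ line
  let ml := if PySem.List.len lw > st.2.2.2 then PySem.List.len lw else st.2.2.2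
  let inner := lw.foldl pvAInner (st.1, st.2.1, ([] : List Int))
  (inner.1, inner.2.1, st.2.2.1 ++ [inner.2.2], ml)

def corpus_to_indices (text : List String) : List (List Int) × Int × Int :=
  let fin := text.foldl pvAOuter (PySem.Dict.empty, 0, [], 0)
  (fin.2.2.1, (fin.1.size : Int), fin.2.2.2)

-- ===== PORT B =====
-- one vocabulary pass over a tokenized line: insert word -> current dict size on first sight
def pvVocabLine (d : PySem.Dict String Int) (ws : List String) : PySem.Dict String Int :=
  ws.foldl (fun d w => if d.contains w then d else d.insert w (d.size : Int)) d

def corpus_to_indices_alt (text : List String) : List (List Int) × Int × Int :=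
  let toks := text.map PySem.Str.split₀
  let maxlen := toks.foldl (fun m t => max m (PySem.List.len t)) 0
  let wm := toks.foldl pvVocabLine PySem.Dict.empty
  -- words_map[w]: every word is a key of the finished table, so getD is exact
  (toks.map (fun t => t.map (fun w => wm.getD w 0)), (wm.size : Int), maxlen)

-- ===== PRECONDITION & SPEC =====
def Spec_corpus_to_indices (text : List String) (out : List (List Int) × Int × Int) : Prop := out = corpus_to_indices_alt text
instance (text : List String) (out : List (List Int) × Int × Int) : Decidable (Spec_corpus_to_indices text out) := by unfold Spec_corpus_to_indices; infer_instance

-- ===== CLAIM (what is proved, stated in full; the proofs are below) =====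
def Claim_equal_corpus_to_indices : Prop := ∀ (text : List String), Dom_corpus_to_indices text → Spec_corpus_to_indices text (corpus_to_indices text)

-- ===== LEMMAS AND PROOFS =====

-- later vocabulary insertions never change an existing entry
theorem pv_get?_step_mono (d : PySem.Dict String Int) (u w : String) (v : Int)
    (h : d.get? w = some v) :
    (if d.contains u then d else d.insert u (d.size : Int)).get? w = some v := by
  split_ifs with hc
  · exact h
  · have hne : w ≠ u := by
      intro he; subst he
      rw [(PySem.Dict.get?_eq_none_iff_contains d w).mpr (by simpa using hc)] at h
      simp at h
    rw [PySem.Dict.get?_insert_of_ne d _ hne]; exact h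

theorem pv_get?_vocabLine_mono (ws : List String) (d : PySem.Dict String Int) (w : String) (v : Int)
    (h : d.get? w = some v) : (pvVocabLine d ws).get? w = some v := by
  induction ws generalizing d with
  | nil => exact h
  | cons u us ih => exact ih _ (pv_get?_step_mono d u w v h)

theorem pv_get?_vocab_mono (ls : List (List String)) (d : PySem.Dict String Int) (w : String) (v : Int)
    (h : d.get? w = some v) : (ls.foldl pvVocabLine d).get? w = some v := by
  induction ls generalizing d with
  | nil => exact h
  | cons t ts ih => exact ih _ (pv_get?_vocabLine_mono t d w v h)

theorem pv_nodup_step (d : PySem.Dict String Int) (u : String) (h : d.keys.Nodup) :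
    (if d.contains u then d else d.insert u (d.size : Int)).keys.Nodup := by
  split_ifs with hc
  · exact h
  · exact PySem.Dict.nodup_keys_insert _ _ _ h

theorem pv_nodup_vocabLine (ws : List String) (d : PySem.Dict String Int) (h : d.keys.Nodup) :
    (pvVocabLine d ws).keys.Nodup := by
  induction ws generalizing d with
  | nil => exact h
  | cons u us ih => exact ih _ (pv_nodup_step d u h)

-- after processing a line, every word of the line has an entry
theorem pv_contains_vocabLine (ws : List String) (d : PySem.Dict String Int) (w : String)
    (h : w ∈ ws ∨ d.contains w = true) : (pvVocabLine d ws).contains w = true := by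
  induction ws generalizing d with
  | nil => simpa using h.resolve_left (by simp)
  | cons u us ih =>
    simp only [pvVocabLine, List.foldl_cons] at *
    apply ih
    rcases h with h | h
    · rcases List.mem_cons.mp h with he | hm
      · subst he
        right
        by_cases hc : d.contains w = true
        · simp [hc]
        · simp only [hc, Bool.false_eq_true, if_false]
          exact PySem.Dict.contains_insert_self _ _ _
      · left; exact hm
    · right
      by_cases hc : d.contains u = true
      · simp [hc, h]
      · simp only [hc, Bool.false_eq_true, if_false]
        rw [PySem.Dict.contains_insert]; simp [h]

-- a contained key has a value, and that value survives the rest of the line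
theorem pv_getD_vocabLine_of_contains (ws : List String) (d : PySem.Dict String Int) (w : String)
    (hc : d.contains w = true) : (pvVocabLine d ws).getD w 0 = d.getD w 0 := by
  cases hv : d.get? w with
  | none => rw [(PySem.Dict.get?_eq_none_iff_contains d w).mp hv] at hc; exact Bool.noConfusion hc
  | some v =>
    rw [PySem.Dict.getD_eq_get?_getD, PySem.Dict.getD_eq_get?_getD, hv,
        pv_get?_vocabLine_mono ws d w v hv]

theorem pv_getD_vocab_of_contains (ls : List (List String)) (d : PySem.Dict String Int) (w : String)
    (hc : d.contains w = true) : (ls.foldl pvVocabLine d).getD w 0 = d.getD w 0 := by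
  cases hv : d.get? w with
  | none => rw [(PySem.Dict.get?_eq_none_iff_contains d w).mp hv] at hc; exact Bool.noConfusion hc
  | some v =>
    rw [PySem.Dict.getD_eq_get?_getD, PySem.Dict.getD_eq_get?_getD, hv,
        pv_get?_vocab_mono ls d w v hv]

-- A's inner word loop, started with counter = dict size, is B's vocabulary pass on the line
-- followed by encoding the line against the resulting dict
theorem pv_inner_eq (ws : List String) (d : PySem.Dict String Int) (acc : List Int) :
    ws.foldl pvAInner (d, (d.size : Int), acc)
    = (pvVocabLine d ws, ((pvVocabLine d ws).size : Int),
       acc ++ ws.map (fun w => (pvVocabLine d ws).getD w 0)) := by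
  induction ws generalizing d acc with
  | nil => simp [pvVocabLine]
  | cons u us ih =>
    have hstep : pvVocabLine d (u :: us)
        = pvVocabLine (if d.contains u then d else d.insert u (d.size : Int)) us := by
      simp [pvVocabLine]
    by_cases hc : d.contains u = true
    · have hhead : pvAInner (d, (d.size : Int), acc) u = (d, (d.size : Int), acc ++ [d.getD u 0]) := by
        simp [pvAInner, hc]
      rw [List.foldl_cons, hhead, ih d (acc ++ [d.getD u 0]), hstep]
      simp only [hc, if_true, List.map_cons, List.append_assoc, List.singleton_append,
        pv_getD_vocabLine_of_contains us d u hc]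
    · have hhead : pvAInner (d, (d.size : Int), acc) u
          = (d.insert u (d.size : Int), ((d.insert u (d.size : Int)).size : Int),
             acc ++ [(d.insert u (d.size : Int)).getD u 0]) := by
        simp [pvAInner, hc, PySem.Dict.size_insert]
      rw [List.foldl_cons, hhead, ih (d.insert u (d.size : Int)) _, hstep]
      simp only [hc, Bool.false_eq_true, if_false, List.map_cons, List.append_assoc,
        List.singleton_append]
      rw [pv_getD_vocabLine_of_contains us _ u (PySem.Dict.contains_insert_self d u _)]

theorem pv_if_max (a b : Int) : (if a > b then a else b) = max b a := by
  rw [max_def]; split_ifs <;> omega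

-- A's outer loop, started with counter = dict size, is B's three passes over the remaining lines
theorem pv_outer_eq (lines : List String) (d : PySem.Dict String Int)
    (acc : List (List Int)) (ml : Int) (hnd : d.keys.Nodup) :
    lines.foldl pvAOuter (d, (d.size : Int), acc, ml)
    = ((lines.map PySem.Str.split₀).foldl pvVocabLine d,
       (((lines.map PySem.Str.split₀).foldl pvVocabLine d).size : Int),
       acc ++ (lines.map PySem.Str.split₀).map
         (fun t => t.map (fun w => ((lines.map PySem.Str.split₀).foldl pvVocabLine d).getD w 0)),
       (lines.map PySem.Str.split₀).foldl (fun m t => max m (PySem.List.len t)) ml) := by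
  induction lines generalizing d acc ml with
  | nil => simp
  | cons line ls ih =>
    have hhead : pvAOuter (d, (d.size : Int), acc, ml) line
        = (pvVocabLine d (PySem.Str.split₀ line),
           ((pvVocabLine d (PySem.Str.split₀ line)).size : Int),
           acc ++ [(PySem.Str.split₀ line).map
             (fun w => (pvVocabLine d (PySem.Str.split₀ line)).getD w 0)],
           max ml (PySem.List.len (PySem.Str.split₀ line))) := by
      simp only [pvAOuter, pv_inner_eq, pv_if_max, List.nil_append]
    rw [List.foldl_cons, hhead,
        ih (pvVocabLine d (PySem.Str.split₀ line)) _ _ (pv_nodup_vocabLine _ d hnd)]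
    have hmap : (PySem.Str.split₀ line).map
          (fun w => (pvVocabLine d (PySem.Str.split₀ line)).getD w 0)
        = (PySem.Str.split₀ line).map
          (fun w => ((ls.map PySem.Str.split₀).foldl pvVocabLine
              (pvVocabLine d (PySem.Str.split₀ line))).getD w 0) :=
      List.map_congr_left (fun w hw => (pv_getD_vocab_of_contains _ _ w
        (pv_contains_vocabLine _ d w (Or.inl hw))).symm)
    simp only [List.map_cons, List.foldl_cons, List.append_assoc, List.singleton_append, hmap]

-- ===== VERDICT (by name: the statement is the Claim_ definition above) =====
theorem pv_outer_zero (text : List String) :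
    text.foldl pvAOuter (PySem.Dict.empty, 0, [], 0)
    = ((text.map PySem.Str.split₀).foldl pvVocabLine PySem.Dict.empty,
       (((text.map PySem.Str.split₀).foldl pvVocabLine PySem.Dict.empty).size : Int),
       (text.map PySem.Str.split₀).map
         (fun t => t.map (fun w => ((text.map PySem.Str.split₀).foldl pvVocabLine
             PySem.Dict.empty).getD w 0)),
       (text.map PySem.Str.split₀).foldl (fun m t => max m (PySem.List.len t)) 0) :=
  pv_outer_eq text PySem.Dict.empty [] 0 (by decide)

theorem corpus_to_indices_spec : Claim_equal_corpus_to_indices := by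
  intro text _
  show _ = _
  unfold corpus_to_indices corpus_to_indices_alt
  rw [pv_outer_zero]
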